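-- pv_equiv track=rewrite | github.com/Reddy030418/deepKlarity_001 | backend/app/ai.py | _build_shopping_list
-- ===== SOURCE A (Python) =====
-- PRODUCE_KEYS = {
--     "onion",
--     "tomato",
--     "garlic",
--     "ginger",
--     "lemon",
--     "lime",
--     "cilantro",
--     "coriander",
--     "spinach",
--     "carrot",
--     "potato",
--     "chili",
--     "pepper",
-- }
--
-- DAIRY_KEYS = {"milk", "butter", "cheese", "paneer", "cream", "yogurt", "curd"}
--
-- BAKERY_KEYS = {"bread", "bun", "roll", "tortilla", "pita"}
--
-- def _categorize_item(item: str) -> str: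
--     lowered = item.lower()
--     if any(key in lowered for key in PRODUCE_KEYS):
--         return "Produce"
--     if any(key in lowered for key in DAIRY_KEYS):
--         return "Dairy"
--     if any(key in lowered for key in BAKERY_KEYS):
--         return "Bakery"
--     if any(k in lowered for k in ["salt", "pepper", "oil", "flour", "rice", "sugar", "spice"]):
--         return "Pantry"
--     return "Other"
--
-- def _build_shopping_list(ingredients: list[dict[str, str]]) -> dict[str, list[str]]:
--     grouped: dict[str, list[str]] = {"Produce": [], "Dairy": [], "Bakery": [], "Pantry": [], "Other": []}
--
--     for ing in ingredients:
--         item = ing.get("item", "").strip()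
--         if not item:
--             continue
--         category = _categorize_item(item)
--         if item not in grouped[category]:
--             grouped[category].append(item)
--
--     return {key: val for key, val in grouped.items() if val}
-- ===== SOURCE B (Python) =====
-- PRODUCE_KEYS = {
--     "onion", "tomato", "garlic", "ginger", "lemon", "lime", "cilantro",
--     "coriander", "spinach", "carrot", "potato", "chili", "pepper",
-- }
--
-- DAIRY_KEYS = {"milk", "butter", "cheese", "paneer", "cream", "yogurt", "curd"}
--
-- BAKERY_KEYS = {"bread", "bun", "roll", "tortilla", "pita"}
--
-- PANTRY_KEYS = ["salt", "pepper", "oil", "flour", "rice", "sugar", "spice"]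
--
--
-- def _categorize_item(item: str) -> str:
--     lowered = item.lower()
--     if any(key in lowered for key in PRODUCE_KEYS):
--         return "Produce"
--     if any(key in lowered for key in DAIRY_KEYS):
--         return "Dairy"
--     if any(key in lowered for key in BAKERY_KEYS):
--         return "Bakery"
--     if any(k in lowered for k in PANTRY_KEYS):
--         return "Pantry"
--     return "Other"
--
--
-- def _build_shopping_list(ingredients: list) -> dict:
--     # Pass 1: collect (category, item) pairs, duplicates allowed.
--     pairs = []
--     for ing in ingredients:
--         item = ing.get("item", "").strip()
--         if item:
--             pairs.append((_categorize_item(item), item))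
--     # Pass 2: per category, dedup preserving first occurrence; keep non-empty.
--     result = {}
--     for cat in ("Produce", "Dairy", "Bakery", "Pantry", "Other"):
--         items = list(dict.fromkeys(item for c, item in pairs if c == cat))
--         if items:
--             result[cat] = items
--     return result
-- ===== Notes on version B (the rewrite author's own statement) =====
-- stated objective: alternative
-- what changed: A appends each item into its category list guarded by a per-item membership scan and filters empty categories at the end; B first collects all (category, item) pairs in one pass with duplicates allowed, then builds the result in a second per-category pass that filters, dedups via dict.fromkeys (first occurrence), and skips empty categories.
import Mathlib
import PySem

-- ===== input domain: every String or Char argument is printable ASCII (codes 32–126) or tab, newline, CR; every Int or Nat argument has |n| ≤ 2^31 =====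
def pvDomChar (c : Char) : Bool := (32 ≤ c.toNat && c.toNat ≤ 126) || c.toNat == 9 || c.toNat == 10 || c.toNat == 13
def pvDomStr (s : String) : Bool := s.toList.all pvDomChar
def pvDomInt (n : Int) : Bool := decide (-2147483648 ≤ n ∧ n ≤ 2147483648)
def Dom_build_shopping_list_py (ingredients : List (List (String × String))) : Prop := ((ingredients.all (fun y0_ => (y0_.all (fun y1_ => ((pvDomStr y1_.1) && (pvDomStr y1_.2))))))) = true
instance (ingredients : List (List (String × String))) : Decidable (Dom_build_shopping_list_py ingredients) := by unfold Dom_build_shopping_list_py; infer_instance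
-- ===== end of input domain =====

-- B restructures A's dedup-while-grouping loop into collect-all-pairs then per-category dedup; same results (objective: alternative).

-- ===== PORT A =====
-- shared helper: _categorize_item.  The Python `any` iterates a set, but `any` is
-- order-independent, so iterating the keys as a list is exact.
def pvCategorizeLow (lowered : String) : String :=
  if ["onion", "tomato", "garlic", "ginger", "lemon", "lime", "cilantro", "coriander",
      "spinach", "carrot", "potato", "chili", "pepper"].any
       (fun key => PySem.Str.isIn key lowered) then "Produce"
  else if ["milk", "butter", "cheese", "paneer", "cream", "yogurt", "curd"].any
       (fun key => PySem.Str.isIn key lowered) then "Dairy"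
  else if ["bread", "bun", "roll", "tortilla", "pita"].any
       (fun key => PySem.Str.isIn key lowered) then "Bakery"
  else if ["salt", "pepper", "oil", "flour", "rice", "sugar", "spice"].any
       (fun k => PySem.Str.isIn k lowered) then "Pantry"
  else "Other"

def pvCategorize (item : String) : String :=
  pvCategorizeLow (PySem.Str.lower item)

-- port of A.  grouped[category] is total here (category is always one of the five keys),
-- so Dict.getD is exact; the in-place `if not in: append` is the conditional-append modify.
def build_shopping_list_py (ingredients : List (List (String × String))) : List (String × List String) :=
  let grouped : PySem.Dict String (List String) :=
    PySem.Dict.ofList [("Produce", []), ("Dairy", []), ("Bakery", []), ("Pantry", []), ("Other", [])]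
  let grouped := ingredients.foldl (fun d ing =>
    let item := PySem.Str.strip (PySem.Dict.getD (PySem.Dict.mk ing) "item" "")
    if item = "" then d
    else
      let category := pvCategorize item
      d.modify category [] (fun l => if l.contains item then l else l ++ [item])) grouped
  grouped.items.filter (fun kv => !kv.2.isEmpty)

-- ===== PORT B =====
def build_shopping_list_py_alt (ingredients : List (List (String × String))) : List (String × List String) :=
  let pairs := ingredients.foldl (fun ps ing =>
    let item := PySem.Str.strip (PySem.Dict.getD (PySem.Dict.mk ing) "item" "")
    if item = "" then ps else ps ++ [(pvCategorize item, item)]) []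
  let result := ["Produce", "Dairy", "Bakery", "Pantry", "Other"].foldl (fun r cat =>
    let items := PySem.List.dedup ((pairs.filter (fun p => p.1 == cat)).map (·.2))
    if items.isEmpty then r else r.insert cat items) (PySem.Dict.empty : PySem.Dict String (List String))
  result.items

-- ===== PRECONDITION & SPEC =====
def Spec_build_shopping_list_py (ingredients : List (List (String × String))) (out : List (String × List String)) : Prop := out = build_shopping_list_py_alt ingredients
instance (ingredients : List (List (String × String))) (out : List (String × List String)) : Decidable (Spec_build_shopping_list_py ingredients out) := by unfold Spec_build_shopping_list_py; infer_instance

-- ===== CLAIM (what is proved, stated in full; the proofs are below) =====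
def Claim_equal_build_shopping_list_py : Prop := ∀ (ingredients : List (List (String × String))), Dom_build_shopping_list_py ingredients → Spec_build_shopping_list_py ingredients (build_shopping_list_py ingredients)

-- ===== LEMMAS AND PROOFS =====

-- the item A/B extract from one ingredient dict
def pvItemOf (ing : List (String × String)) : String :=
  PySem.Str.strip (PySem.Dict.getD (PySem.Dict.mk ing) "item" "")

-- cons-form of the (category, item) pair list both loops are about
def pvPairs (ingredients : List (List (String × String))) : List (String × String) :=
  ((ingredients.map pvItemOf).filter (fun s => s ≠ "")).map (fun s => (pvCategorize s, s))

-- items of one category, in order, duplicates kept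
def pvCatItems (c : String) (ingredients : List (List (String × String))) : List String :=
  ((pvPairs ingredients).filter (fun p => p.1 == c)).map (·.2)

-- the two loop bodies, named (definitionally equal to the lambdas in the ports)
def pvStepA (d : PySem.Dict String (List String)) (ing : List (String × String)) :
    PySem.Dict String (List String) :=
  if pvItemOf ing = "" then d
  else d.modify (pvCategorize (pvItemOf ing)) []
        (fun l => if l.contains (pvItemOf ing) then l else l ++ [pvItemOf ing])

def pvStepB (ps : List (String × String)) (ing : List (String × String)) : List (String × String) :=
  if pvItemOf ing = "" then ps else ps ++ [(pvCategorize (pvItemOf ing), pvItemOf ing)]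

lemma pvCategorize_cases (item : String) :
    pvCategorize item = "Produce" ∨ pvCategorize item = "Dairy" ∨ pvCategorize item = "Bakery" ∨
    pvCategorize item = "Pantry" ∨ pvCategorize item = "Other" := by
  unfold pvCategorize pvCategorizeLow; split_ifs <;> simp

lemma pvPairs_cons (ing : List (String × String)) (rest : List (List (String × String))) :
    pvPairs (ing :: rest) =
      (if pvItemOf ing = "" then [] else [(pvCategorize (pvItemOf ing), pvItemOf ing)]) ++ pvPairs rest := by
  unfold pvPairs
  by_cases h : pvItemOf ing = "" <;> simp [h]

lemma pvCatItems_cons (c : String) (ing : List (String × String)) (rest : List (List (String × String))) :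
    pvCatItems c (ing :: rest) =
      (if pvItemOf ing = "" then [] else if pvCategorize (pvItemOf ing) == c
        then [pvItemOf ing] else []) ++ pvCatItems c rest := by
  unfold pvCatItems
  rw [pvPairs_cons]
  by_cases h : pvItemOf ing = ""
  · simp [h]
  · by_cases hc : pvCategorize (pvItemOf ing) == c <;> simp [h, hc]

-- B's accumulator loop builds pvPairs
lemma pvPairsLoop_eq (ingredients : List (List (String × String))) (acc : List (String × String)) :
    ingredients.foldl pvStepB acc = acc ++ pvPairs ingredients := by
  induction ingredients generalizing acc with
  | nil => simp [pvPairs]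
  | cons ing rest ih =>
      rw [List.foldl_cons, pvPairs_cons, ih]
      by_cases h : pvItemOf ing = "" <;> simp [pvStepB, h]

-- abbreviation for the loop state (proof-side only)
def pvMk5 (p q b t o : List String) : PySem.Dict String (List String) :=
  PySem.Dict.mk [("Produce", p), ("Dairy", q), ("Bakery", b), ("Pantry", t), ("Other", o)]

-- A's main loop, on the always-five-keys dict, updates each category list by Set.add
set_option maxHeartbeats 400000 in
lemma pvALoop_eq (ingredients : List (List (String × String))) (p q b t o : List String) :
    ingredients.foldl pvStepA
      (PySem.Dict.mk [("Produce", p), ("Dairy", q), ("Bakery", b), ("Pantry", t), ("Other", o)])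
    = PySem.Dict.mk
        [("Produce", PySem.Set.update p (pvCatItems "Produce" ingredients)),
         ("Dairy",   PySem.Set.update q (pvCatItems "Dairy" ingredients)),
         ("Bakery",  PySem.Set.update b (pvCatItems "Bakery" ingredients)),
         ("Pantry",  PySem.Set.update t (pvCatItems "Pantry" ingredients)),
         ("Other",   PySem.Set.update o (pvCatItems "Other" ingredients))] := by
  induction ingredients generalizing p q b t o with
  | nil => simp [pvCatItems, pvPairs, PySem.Set.update]
  | cons ing rest ih =>
      rw [List.foldl_cons]
      by_cases h : pvItemOf ing = ""
      · rw [show pvStepA (PySem.Dict.mk [("Produce", p), ("Dairy", q), ("Bakery", b), ("Pantry", t), ("Other", o)]) ing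
              = PySem.Dict.mk [("Produce", p), ("Dairy", q), ("Bakery", b), ("Pantry", t), ("Other", o)]
            from by simp [pvStepA, h]]
        rw [ih]
        congr 1
        simp [pvCatItems_cons, h]
      · rcases pvCategorize_cases (pvItemOf ing) with hc | hc | hc | hc | hc
        · have hstep : pvStepA (PySem.Dict.mk [("Produce", p), ("Dairy", q), ("Bakery", b), ("Pantry", t), ("Other", o)]) ing
              = pvMk5 (if p.contains (pvItemOf ing) then p else p ++ [pvItemOf ing]) q b t o := by
            simp [pvStepA, if_neg h, hc, pvMk5, PySem.Dict.modify, PySem.Dict.insert, PySem.Dict.getD, PySem.Dict.get?, PySem.Dict.contains]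
          rw [hstep]; unfold pvMk5; rw [ih]
          refine congrArg PySem.Dict.mk ?_
          simp only [pvCatItems_cons, h, hc, if_false, List.cons.injEq, Prod.mk.injEq]
          simp [PySem.Set.update, PySem.Set.add]
        · have hstep : pvStepA (PySem.Dict.mk [("Produce", p), ("Dairy", q), ("Bakery", b), ("Pantry", t), ("Other", o)]) ing
              = pvMk5 p (if q.contains (pvItemOf ing) then q else q ++ [pvItemOf ing]) b t o := by
            simp [pvStepA, if_neg h, hc, pvMk5, PySem.Dict.modify, PySem.Dict.insert, PySem.Dict.getD, PySem.Dict.get?, PySem.Dict.contains]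
          rw [hstep]; unfold pvMk5; rw [ih]
          refine congrArg PySem.Dict.mk ?_
          simp only [pvCatItems_cons, h, hc, if_false, List.cons.injEq, Prod.mk.injEq]
          simp [PySem.Set.update, PySem.Set.add]
        · have hstep : pvStepA (PySem.Dict.mk [("Produce", p), ("Dairy", q), ("Bakery", b), ("Pantry", t), ("Other", o)]) ing
              = pvMk5 p q (if b.contains (pvItemOf ing) then b else b ++ [pvItemOf ing]) t o := by
            simp [pvStepA, if_neg h, hc, pvMk5, PySem.Dict.modify, PySem.Dict.insert, PySem.Dict.getD, PySem.Dict.get?, PySem.Dict.contains]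
          rw [hstep]; unfold pvMk5; rw [ih]
          refine congrArg PySem.Dict.mk ?_
          simp only [pvCatItems_cons, h, hc, if_false, List.cons.injEq, Prod.mk.injEq]
          simp [PySem.Set.update, PySem.Set.add]
        · have hstep : pvStepA (PySem.Dict.mk [("Produce", p), ("Dairy", q), ("Bakery", b), ("Pantry", t), ("Other", o)]) ing
              = pvMk5 p q b (if t.contains (pvItemOf ing) then t else t ++ [pvItemOf ing]) o := by
            simp [pvStepA, if_neg h, hc, pvMk5, PySem.Dict.modify, PySem.Dict.insert, PySem.Dict.getD, PySem.Dict.get?, PySem.Dict.contains]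
          rw [hstep]; unfold pvMk5; rw [ih]
          refine congrArg PySem.Dict.mk ?_
          simp only [pvCatItems_cons, h, hc, if_false, List.cons.injEq, Prod.mk.injEq]
          simp [PySem.Set.update, PySem.Set.add]
        · have hstep : pvStepA (PySem.Dict.mk [("Produce", p), ("Dairy", q), ("Bakery", b), ("Pantry", t), ("Other", o)]) ing
              = pvMk5 p q b t (if o.contains (pvItemOf ing) then o else o ++ [pvItemOf ing]) := by
            simp [pvStepA, if_neg h, hc, pvMk5, PySem.Dict.modify, PySem.Dict.insert, PySem.Dict.getD, PySem.Dict.get?, PySem.Dict.contains]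
          rw [hstep]; unfold pvMk5; rw [ih]
          refine congrArg PySem.Dict.mk ?_
          simp only [pvCatItems_cons, h, hc, if_false, List.cons.injEq, Prod.mk.injEq]
          simp [PySem.Set.update, PySem.Set.add]

-- the second loop of B: inserting each non-empty category under fresh distinct keys
lemma pvResLoop (ingredients : List (List (String × String))) (cats : List String)
    (r : PySem.Dict String (List String))
    (hfresh : ∀ c ∈ cats, r.contains c = false) (hnd : cats.Nodup) :
    (cats.foldl (fun r c =>
        if (PySem.Set.ofList (pvCatItems c ingredients)).isEmpty then r
        else r.insert c (PySem.Set.ofList (pvCatItems c ingredients))) r).items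
      = r.items ++ (cats.filter (fun c => !(PySem.Set.ofList (pvCatItems c ingredients)).isEmpty)).map
          (fun c => (c, PySem.Set.ofList (pvCatItems c ingredients))) := by
  induction cats generalizing r with
  | nil => simp
  | cons c cs ih =>
      rw [List.foldl_cons]
      have hc := hfresh c (by simp)
      have hnd' := List.nodup_cons.mp hnd
      by_cases hg : (PySem.Set.ofList (pvCatItems c ingredients)).isEmpty
      · rw [if_pos hg, ih _ (fun c' hc' => hfresh c' (by simp [hc'])) hnd'.2]
        simp [hg]
      · rw [if_neg hg, ih]
        · rw [PySem.Dict.items_insert, hc]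
          simp [hg]
        · intro c' hc'
          rw [PySem.Dict.contains_insert]
          have hne : c' ≠ c := fun hEq => hnd'.1 (hEq ▸ hc')
          simp [hne, hfresh c' (by simp [hc'])]
        · exact hnd'.2

-- ===== VERDICT (by name: the statement is the Claim_ definition above) =====
set_option maxHeartbeats 1600000 in
theorem build_shopping_list_py_spec : Claim_equal_build_shopping_list_py := by
  intro ingredients _
  unfold Spec_build_shopping_list_py
  have hA : build_shopping_list_py ingredients =
      (ingredients.foldl pvStepA
        (PySem.Dict.mk [("Produce", []), ("Dairy", []), ("Bakery", []), ("Pantry", []), ("Other", [])])).items.filter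
        (fun kv => !kv.2.isEmpty) := rfl
  have hB : build_shopping_list_py_alt ingredients =
      (["Produce", "Dairy", "Bakery", "Pantry", "Other"].foldl (fun r cat =>
        let items := PySem.List.dedup (((ingredients.foldl pvStepB []).filter (fun p => p.1 == cat)).map (·.2))
        if items.isEmpty then r else r.insert cat items)
        (PySem.Dict.empty : PySem.Dict String (List String))).items := rfl
  rw [hA, hB, pvALoop_eq, pvPairsLoop_eq]
  simp only [List.nil_append]
  simp only [show ∀ c : String, (((pvPairs ingredients).filter (fun p => p.1 == c)).map (fun x => x.2)) = pvCatItems c ingredients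
      from fun c => rfl]
  simp only [PySem.List.dedup_eq_ofList, PySem.Set.update_nil_left]
  rw [pvResLoop ingredients ["Produce", "Dairy", "Bakery", "Pantry", "Other"] PySem.Dict.empty
        (fun c _ => rfl) (by decide)]
  rw [show [("Produce", PySem.Set.ofList (pvCatItems "Produce" ingredients)),
            ("Dairy",   PySem.Set.ofList (pvCatItems "Dairy" ingredients)),
            ("Bakery",  PySem.Set.ofList (pvCatItems "Bakery" ingredients)),
            ("Pantry",  PySem.Set.ofList (pvCatItems "Pantry" ingredients)),
            ("Other",   PySem.Set.ofList (pvCatItems "Other" ingredients))]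
        = (["Produce", "Dairy", "Bakery", "Pantry", "Other"].map
            (fun c => (c, PySem.Set.ofList (pvCatItems c ingredients)))) from by simp]
  rw [List.filter_map]
  simp only [Function.comp_def]
  rfl
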